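-- pv_equiv track=rewrite | github.com/jclsongco/UnnecessaryTicTacToe | tictactoe.py | hori_check
-- ===== SOURCE A (Python) =====
-- def hori_check(cell_list,number): #number is the number of rows or columns, check for horizontal win conditions
--     positions = []
--     for place in cell_list:
--         positions.append(place[0][1])
--     index = set(positions)
--
--     for num in index:
--         counter = positions.count(num)
--         if counter == number:
--             return True
-- ===== SOURCE B (Python) =====
-- def hori_check(cell_list, number):
--     positions = sorted(place[0][1] for place in cell_list)
--     if not positions:
--         return None
--     prev = positions[0]
--     run = 1
--     for v in positions[1:]:
--         if v == prev:
--             run += 1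
--         else:
--             if run == number:
--                 return True
--             prev = v
--             run = 1
--     if run == number:
--         return True
-- ===== Notes on version B (the rewrite author's own statement) =====
-- stated objective: alternative
-- what changed: B sorts the extracted index values once and scans equal runs in a single pass, instead of A's building a set and re-scanning the whole list with positions.count for each distinct value.
import Mathlib
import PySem

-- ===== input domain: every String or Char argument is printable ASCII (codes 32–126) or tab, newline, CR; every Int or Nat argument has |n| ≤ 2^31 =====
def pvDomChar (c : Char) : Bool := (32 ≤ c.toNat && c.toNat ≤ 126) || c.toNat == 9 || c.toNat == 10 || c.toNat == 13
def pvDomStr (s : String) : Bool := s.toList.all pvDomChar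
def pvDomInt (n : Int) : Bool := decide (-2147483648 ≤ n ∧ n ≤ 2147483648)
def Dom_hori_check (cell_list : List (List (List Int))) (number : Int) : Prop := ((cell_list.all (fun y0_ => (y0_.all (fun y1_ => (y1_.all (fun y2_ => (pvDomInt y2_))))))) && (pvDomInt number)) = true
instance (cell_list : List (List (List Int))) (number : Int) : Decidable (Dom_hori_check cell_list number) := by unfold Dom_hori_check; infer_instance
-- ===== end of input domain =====

-- B sorts the extracted index values once and scans equal runs in one pass, instead of building a set and re-counting the whole list per distinct value (alternative decomposition, same return values).


-- ===== PORT A =====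
-- place[0][1], as both Pythons write it; Pre_ guarantees both indices are in range, so the getD defaults are never used
def hcPlace01 (place : List (List Int)) : Int :=
  (PySem.List.pyGet? ((PySem.List.pyGet? place 0).getD []) 1).getD 0

-- for num in index: if positions.count(num) == number: return True   (falls off the end → None)
def hcLoopA (positions : List Int) (number : Int) : List Int → Option Bool
  | [] => none
  | num :: rest =>
      if ((PySem.List.count positions num : Nat) : Int) = number then some true
      else hcLoopA positions number rest

def hori_check (cell_list : List (List (List Int))) (number : Int) : Option Bool :=
  let positions := cell_list.foldl (fun acc place => acc ++ [hcPlace01 place]) []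
  let index := PySem.Set.ofList positions
  hcLoopA positions number index

-- ===== PORT B =====

-- the run-length scan over the tail of the sorted list: prev/run are the loop state
def hcGo (number : Int) : Int → Int → List Int → Option Bool
  | _, run, [] => if run = number then some true else none
  | prev, run, v :: rest =>
      if v = prev then hcGo number prev (run + 1) rest
      else if run = number then some true
      else hcGo number v 1 rest

def hori_check_alt (cell_list : List (List (List Int))) (number : Int) : Option Bool :=
  let positions := PySem.List.sorted (cell_list.map hcPlace01) (fun x => x) false
  match positions with
  | [] => none
  | p :: rest => hcGo number p 1 rest

-- ===== PRECONDITION & SPEC =====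
-- Pre_ excludes exactly the inputs where place[0][1] raises IndexError in A (and in B): some place is empty or its first row has fewer than 2 entries.
def Pre_hori_check (cell_list : List (List (List Int))) (number : Int) : Prop :=
  ∀ place ∈ cell_list, place ≠ [] ∧ 2 ≤ (place.headD []).length

instance (cell_list : List (List (List Int))) (number : Int) : Decidable (Pre_hori_check cell_list number) := by
  unfold Pre_hori_check; infer_instance

def pvWitness_hori_check : List (List (List Int)) × Int := ([[[0, 1]], [[1, 1]], [[2, 2]]], 2)

def Spec_hori_check (cell_list : List (List (List Int))) (number : Int) (out : Option Bool) : Prop := out = hori_check_alt cell_list number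
instance (cell_list : List (List (List Int))) (number : Int) (out : Option Bool) : Decidable (Spec_hori_check cell_list number out) := by unfold Spec_hori_check; infer_instance

-- ===== CLAIM (what is proved, stated in full; the proofs are below) =====
def Claim_equal_hori_check : Prop := ∀ (cell_list : List (List (List Int))) (number : Int), Dom_hori_check cell_list number → Pre_hori_check cell_list number → Spec_hori_check cell_list number (hori_check cell_list number)

-- ===== LEMMAS AND PROOFS =====

-- A's set loop returns some true iff some listed value has count = number
lemma hcLoopA_spec (positions : List Int) (number : Int) (idx : List Int) :
    hcLoopA positions number idx =
      if ∃ v ∈ idx, ((positions.count v : Nat) : Int) = number then some true else none := by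
  induction idx with
  | nil => simp [hcLoopA]
  | cons num rest ih =>
      by_cases h : ((positions.count num : Nat) : Int) = number
      · simp [hcLoopA, PySem.List.count_eq, h]
      · simp [hcLoopA, PySem.List.count_eq, h, ih]

-- the run scan on a sorted tail: returns some true iff prev's total count (run so far + remaining)
-- hits number, or some later value's count in the tail does
lemma hcGo_spec (number : Int) (l : List Int) :
    ∀ (prev run : Int), l.Pairwise (· ≤ ·) → (∀ v ∈ l, prev ≤ v) →
    hcGo number prev run l =
      if run + (l.count prev : Int) = number ∨ ∃ v ∈ l, v ≠ prev ∧ ((l.count v : Nat) : Int) = number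
      then some true else none := by
  induction l with
  | nil => intro prev run _ _; simp [hcGo]
  | cons v rest ih =>
      intro prev run hs hlb
      have hs' : rest.Pairwise (· ≤ ·) := hs.tail
      have hvle : ∀ w ∈ rest, v ≤ w := by
        intro w hw; exact (List.pairwise_cons.mp hs).1 w hw
      by_cases hvp : v = prev
      · subst hvp
        rw [hcGo, if_pos (rfl : v = v)]
        rw [ih v (run + 1) hs' hvle]
        refine if_congr ?_ rfl rfl
        simp only [List.count_cons_self]
        constructor
        · rintro (h | ⟨w, hw, hne, hc⟩)
          · left; push_cast at h ⊢; omega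
          · right; exact ⟨w, List.mem_cons_of_mem _ hw, hne, by
              rwa [List.count_cons_of_ne (Ne.symm hne)]⟩
        · rintro (h | ⟨w, hw, hne, hc⟩)
          · left; push_cast at h ⊢; omega
          · rcases List.mem_cons.mp hw with rfl | hw'
            · exact absurd rfl hne
            · right; exact ⟨w, hw', hne, by rwa [List.count_cons_of_ne (Ne.symm hne)] at hc⟩
      · -- v ≠ prev, so prev < v and prev occurs nowhere in v :: rest
        have hpv : prev < v := lt_of_le_of_ne (hlb v (List.mem_cons_self)) (fun h => hvp h.symm)
        have hnp : prev ∉ v :: rest := by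
          intro hmem
          rcases List.mem_cons.mp hmem with h | h
          · exact hvp h.symm
          · exact absurd (hvle prev h) (not_le.mpr hpv)
        have hcp : ((v :: rest).count prev : Int) = 0 := by
          simp [List.count_eq_zero_of_not_mem hnp]
        rw [hcGo]
        simp only [if_neg hvp]
        by_cases hrn : run = number
        · rw [if_pos hrn, if_pos (Or.inl (by rw [hcp]; omega))]
        · rw [if_neg hrn]
          rw [ih v 1 hs' hvle]
          refine if_congr ?_ rfl rfl
          rw [hcp]
          constructor
          · rintro (h | ⟨w, hw, hne, hc⟩)
            · right
              refine ⟨v, List.mem_cons_self, fun hh => hvp hh, ?_⟩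
              rw [List.count_cons_self]; push_cast; omega
            · right
              have hvw : v < w := lt_of_le_of_ne (hvle w hw) (fun h => hne h.symm)
              refine ⟨w, List.mem_cons_of_mem _ hw, fun hh => absurd hh (by omega), ?_⟩
              rwa [List.count_cons_of_ne (Ne.symm hne)]
          · rintro h
            rcases h with h | ⟨w, hw, hne, hc⟩
            · omega
            · rcases List.mem_cons.mp hw with rfl | hw'
              · left; rw [List.count_cons_self] at hc; push_cast at hc ⊢; omega
              · by_cases hwv : w = v
                · subst hwv; left; rw [List.count_cons_self] at hc; push_cast at hc ⊢; omega
                · right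
                  exact ⟨w, hw', hwv, by rwa [List.count_cons_of_ne (Ne.symm hwv)] at hc⟩

-- B on a list of values: some true iff some value's count hits number
lemma alt_char (vals : List Int) (number : Int) :
    (match PySem.List.sorted vals (fun x => x) false with
      | [] => none
      | p :: rest => hcGo number p 1 rest) =
      if ∃ v ∈ vals, ((vals.count v : Nat) : Int) = number then some true else none := by
  have hperm : (PySem.List.sorted vals (fun x => x) false).Perm vals :=
    PySem.List.sorted_perm vals (fun x => x) false
  rcases hsort : PySem.List.sorted vals (fun x => x) false with _ | ⟨p, rest⟩
  · have : vals = [] := by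
      have := hperm; rw [hsort] at this; exact this.symm.eq_nil
    subst this; simp
  · have hpw : (p :: rest).Pairwise (· ≤ ·) := by
      have := PySem.List.sorted_pairwise vals (fun x => x)
      rwa [hsort] at this
    have hlb : ∀ v ∈ rest, p ≤ v := (List.pairwise_cons.mp hpw).1
    show hcGo number p 1 rest = _
    rw [hcGo_spec number rest p 1 hpw.tail hlb]
    have hperm' : (p :: rest).Perm vals := by rw [hsort] at hperm; exact hperm
    refine if_congr ?_ rfl rfl
    constructor
    · rintro (h | ⟨w, hw, hne, hc⟩)
      · refine ⟨p, hperm'.mem_iff.mp List.mem_cons_self, ?_⟩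
        rw [← hperm'.count_eq, List.count_cons_self]; push_cast; omega
      · refine ⟨w, hperm'.mem_iff.mp (List.mem_cons_of_mem _ hw), ?_⟩
        rw [← hperm'.count_eq, List.count_cons_of_ne (Ne.symm hne)]; exact hc
    · rintro ⟨w, hw, hc⟩
      rw [← hperm'.count_eq] at hc
      by_cases hwp : w = p
      · subst hwp; left; rw [List.count_cons_self] at hc; push_cast at hc ⊢; omega
      · right
        have hwmem : w ∈ p :: rest := hperm'.mem_iff.mpr hw
        rcases List.mem_cons.mp hwmem with rfl | hw'
        · exact absurd rfl hwp
        · exact ⟨w, hw', hwp, by rwa [List.count_cons_of_ne (Ne.symm hwp)] at hc⟩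

-- ===== VERDICT (by name: the statement is the Claim_ definition above) =====
theorem hori_check_spec : Claim_equal_hori_check := by
  intro cell_list number _ _
  unfold Spec_hori_check hori_check hori_check_alt
  rw [PySem.List.foldl_append_singleton_eq_map]
  rw [alt_char (cell_list.map hcPlace01) number, hcLoopA_spec]
  simp only [List.nil_append]
  refine if_congr ?_ rfl rfl
  constructor
  · rintro ⟨v, hv, hc⟩
    exact ⟨v, (PySem.Set.mem_ofList _ _).mp hv, hc⟩
  · rintro ⟨v, hv, hc⟩
    exact ⟨v, (PySem.Set.mem_ofList _ _).mpr hv, hc⟩
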